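-- pv_equiv track=rewrite | github.com/etnes/MUMer | SAIS.py | lmsSubstringAreEqual
-- ===== SOURCE A (Python) =====
-- S_TYPE = ord('S')
--
-- L_TYPE = ord('L')
--
-- def isLMSChar(offset, typemap):
--     """
--     Retruns true if the character at the given offset is
--     left-most S-type character.
--     """
--
--     #first character can't be LMS char
--     if offset <= 0:
--         return False
--     if typemap[offset] == S_TYPE and typemap[offset - 1] == L_TYPE:
--         return True
--
--     return False
--
-- def lmsSubstringAreEqual(string, typemap, offsetA, offsetB):
--     """
--     Returns True if LMS substring at offsetA and offsetB are euqal.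
--     """
--
--     #if one of the substring is last '$', then we know that substrings
--     #cant be equal
--     if offsetA == len(string) or offsetB == len(string):
--         return False
--
--     i = 0
--     while True:
--         aIsLMS = isLMSChar(i + offsetA, typemap)
--         bIsLMS = isLMSChar(i + offsetB, typemap)
--
--         # if we found the start of the next LMS substring
--         # then we found equal substrings
--         if (i > 0 and aIsLMS and bIsLMS):
--             return True
--
--         # substring has difference
--         if aIsLMS != bIsLMS:
--             return False
--
--         # substings has different character, so they are not equal
--         if string[i + offsetA] != string[i + offsetB]:
--             return False
--
--         i += 1
-- ===== SOURCE B (Python) =====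
-- S_TYPE = ord('S')
--
-- L_TYPE = ord('L')
--
-- def _flag(typemap, j):
--     """True if position j (1 <= j < len(typemap)) is an S after an L."""
--     return typemap[j] == S_TYPE and typemap[j - 1] == L_TYPE
--
-- def _isLMS(typemap, j):
--     # same logic as A's isLMSChar: no bound check beyond j > 0
--     return 0 < j and _flag(typemap, j)
--
-- def _nextLMSDistance(typemap, offset):
--     """Distance from offset to the next LMS position after it, or None."""
--     j = max(offset, 0) + 1
--     while j < len(typemap):
--         if _flag(typemap, j):
--             return j - offset
--         j += 1
--     return None
--
-- def lmsSubstringAreEqual(string, typemap, offsetA, offsetB):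
--     if offsetA == len(string) or offsetB == len(string):
--         return False
--     dA = _nextLMSDistance(typemap, offsetA)
--     dB = _nextLMSDistance(typemap, offsetB)
--     if _isLMS(typemap, offsetA) != _isLMS(typemap, offsetB) or dA != dB or dA is None:
--         return False
--     return all(string[i + offsetA] == string[i + offsetB] for i in range(dA))
-- ===== Notes on version B (the rewrite author's own statement) =====
-- stated objective: alternative
-- what changed: A decides equality in one fused loop that interleaves LMS-flag tests and character tests; B decomposes the task into two bounded boundary scans that compute the distance to the next LMS position for each offset, then compares the two distances, the flags at the offsets themselves, and the characters over that single range.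
import Mathlib
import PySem

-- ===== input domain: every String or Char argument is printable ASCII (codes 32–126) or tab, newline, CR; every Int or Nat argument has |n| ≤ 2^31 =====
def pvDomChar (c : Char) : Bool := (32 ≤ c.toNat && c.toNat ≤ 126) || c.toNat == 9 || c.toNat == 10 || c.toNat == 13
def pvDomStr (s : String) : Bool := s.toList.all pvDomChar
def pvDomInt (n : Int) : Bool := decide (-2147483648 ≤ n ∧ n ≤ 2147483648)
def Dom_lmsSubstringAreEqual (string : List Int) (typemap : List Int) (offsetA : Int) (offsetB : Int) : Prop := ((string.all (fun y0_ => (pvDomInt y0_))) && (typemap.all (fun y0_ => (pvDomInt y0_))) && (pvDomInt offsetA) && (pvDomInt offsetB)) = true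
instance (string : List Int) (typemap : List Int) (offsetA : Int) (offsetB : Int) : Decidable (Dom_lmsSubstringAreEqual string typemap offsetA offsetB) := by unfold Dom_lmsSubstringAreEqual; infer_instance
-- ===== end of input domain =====

-- B replaces A's fused scan/compare loop by two bounded next-LMS-boundary scans plus one
-- character comparison over the resulting range (objective: alternative decomposition, not faster).

-- ===== PORT A =====
-- literal port of isLMSChar (typemap[offset] is port-total via pyGetD; Pre_ keeps all visited indices in range)
def isLMSChar (offset : Int) (typemap : List Int) : Bool :=
  if offset ≤ 0 then false
  else if PySem.List.pyGetD typemap offset 0 = 83 ∧ PySem.List.pyGetD typemap (offset - 1) 0 = 76 then true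
  else false

-- the 'while True' loop of A; fuel only makes the recursion total, Pre_ guarantees a return before fuel runs out
def lmsLoop (string : List Int) (typemap : List Int) (offsetA : Int) (offsetB : Int) : Nat → Nat → Bool
  | 0, _ => false
  | fuel+1, i =>
    let aIsLMS := isLMSChar ((i : Int) + offsetA) typemap
    let bIsLMS := isLMSChar ((i : Int) + offsetB) typemap
    if 0 < i ∧ aIsLMS = true ∧ bIsLMS = true then true
    else if aIsLMS ≠ bIsLMS then false
    else if PySem.List.pyGetD string ((i : Int) + offsetA) 0 ≠ PySem.List.pyGetD string ((i : Int) + offsetB) 0 then false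
    else lmsLoop string typemap offsetA offsetB fuel (i + 1)

def lmsSubstringAreEqual (string : List Int) (typemap : List Int) (offsetA : Int) (offsetB : Int) : Bool :=
  if offsetA = (string.length : Int) ∨ offsetB = (string.length : Int) then false
  else lmsLoop string typemap offsetA offsetB
        (string.length + typemap.length + offsetA.natAbs + offsetB.natAbs + 2) 0

-- ===== PORT B =====
-- _flag: S after L at position j (1 ≤ j < len typemap on every use)
def bFlag (typemap : List Int) (j : Int) : Bool :=
  PySem.List.pyGetD typemap j 0 == 83 && PySem.List.pyGetD typemap (j - 1) 0 == 76

def bIsLMS (typemap : List Int) (j : Int) : Bool :=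
  decide (0 < j) && bFlag typemap j

-- the while loop of _nextLMSDistance (fuel = len typemap + 1 covers every iteration of the Python loop)
def bNextScan (typemap : List Int) (offset : Int) : Int → Nat → Option Int
  | _, 0 => none
  | j, fuel+1 =>
    if j < (typemap.length : Int) then
      if bFlag typemap j then some (j - offset)
      else bNextScan typemap offset (j + 1) fuel
    else none

def bNextLMSDistance (typemap : List Int) (offset : Int) : Option Int :=
  bNextScan typemap offset (max offset 0 + 1) (typemap.length + 1)

def lmsSubstringAreEqual_alt (string : List Int) (typemap : List Int) (offsetA : Int) (offsetB : Int) : Bool :=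
  if offsetA = (string.length : Int) ∨ offsetB = (string.length : Int) then false
  else
    let dA := bNextLMSDistance typemap offsetA
    let dB := bNextLMSDistance typemap offsetB
    if bIsLMS typemap offsetA ≠ bIsLMS typemap offsetB ∨ dA ≠ dB ∨ dA = none then false
    else
      match dA with
      | none => false
      | some d =>
        (List.range d.toNat).all
          (fun i => PySem.List.pyGetD string ((i : Int) + offsetA) 0 == PySem.List.pyGetD string ((i : Int) + offsetB) 0)

-- ===== PRECONDITION & SPEC =====
-- Pre_ admits exactly the inputs on which Python A returns (it excludes only IndexError runs):
-- either the sentinel guard fires, or A's loop reaches a deciding step i with every index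
-- touched at steps ≤ i in range.  pvLms/pvSafe are Pre_'s own spellings of the tests A makes.
def pvLms (typemap : List Int) (o : Int) : Bool :=
  decide (0 < o) && (PySem.List.pyGetD typemap o 0 == 83) && (PySem.List.pyGetD typemap (o - 1) 0 == 76)

def pvSafeL (typemap : List Int) (o : Int) : Prop := o ≤ 0 ∨ o < (typemap.length : Int)

def pvSafeC (string : List Int) (o : Int) : Prop := -(string.length : Int) ≤ o ∧ o < (string.length : Int)

-- step i of A's loop returns (some branch fires, all indices it touches in range)
def pvReturns (string : List Int) (typemap : List Int) (a : Int) (b : Int) (i : Nat) : Prop :=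
  pvSafeL typemap ((i : Int) + a) ∧ pvSafeL typemap ((i : Int) + b) ∧
    ((0 < i ∧ pvLms typemap ((i : Int) + a) = true ∧ pvLms typemap ((i : Int) + b) = true)
     ∨ pvLms typemap ((i : Int) + a) ≠ pvLms typemap ((i : Int) + b)
     ∨ (pvSafeC string ((i : Int) + a) ∧ pvSafeC string ((i : Int) + b) ∧
        PySem.List.pyGetD string ((i : Int) + a) 0 ≠ PySem.List.pyGetD string ((i : Int) + b) 0))

-- step i of A's loop falls through to i+1 (no branch fires, all indices in range)
def pvCont (string : List Int) (typemap : List Int) (a : Int) (b : Int) (i : Nat) : Prop :=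
  pvSafeL typemap ((i : Int) + a) ∧ pvSafeL typemap ((i : Int) + b) ∧
  pvLms typemap ((i : Int) + a) = pvLms typemap ((i : Int) + b) ∧
  ¬(0 < i ∧ pvLms typemap ((i : Int) + a) = true ∧ pvLms typemap ((i : Int) + b) = true) ∧
  pvSafeC string ((i : Int) + a) ∧ pvSafeC string ((i : Int) + b) ∧
  PySem.List.pyGetD string ((i : Int) + a) 0 = PySem.List.pyGetD string ((i : Int) + b) 0

def Pre_lmsSubstringAreEqual (string : List Int) (typemap : List Int) (offsetA : Int) (offsetB : Int) : Prop :=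
  offsetA = (string.length : Int) ∨ offsetB = (string.length : Int) ∨
  ∃ i < 2 * string.length + 1,
    pvReturns string typemap offsetA offsetB i ∧ ∀ j < i, pvCont string typemap offsetA offsetB j

instance (string : List Int) (typemap : List Int) (offsetA : Int) (offsetB : Int) : Decidable (Pre_lmsSubstringAreEqual string typemap offsetA offsetB) := by
  unfold Pre_lmsSubstringAreEqual pvReturns pvCont pvSafeL pvSafeC; infer_instance

def pvWitness_lmsSubstringAreEqual : List Int × List Int × Int × Int := ([5, 5], [76, 83, 76], 0, 1)

def Spec_lmsSubstringAreEqual (string : List Int) (typemap : List Int) (offsetA : Int) (offsetB : Int) (out : Bool) : Prop := out = lmsSubstringAreEqual_alt string typemap offsetA offsetB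
instance (string : List Int) (typemap : List Int) (offsetA : Int) (offsetB : Int) (out : Bool) : Decidable (Spec_lmsSubstringAreEqual string typemap offsetA offsetB out) := by unfold Spec_lmsSubstringAreEqual; infer_instance

-- ===== CLAIM (what is proved, stated in full; the proofs are below) =====
def Claim_equal_lmsSubstringAreEqual : Prop := ∀ (string : List Int) (typemap : List Int) (offsetA : Int) (offsetB : Int), Dom_lmsSubstringAreEqual string typemap offsetA offsetB → Pre_lmsSubstringAreEqual string typemap offsetA offsetB → Spec_lmsSubstringAreEqual string typemap offsetA offsetB (lmsSubstringAreEqual string typemap offsetA offsetB)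

-- ===== LEMMAS AND PROOFS =====

theorem isLMSChar_eq_pvLms (typemap : List Int) (o : Int) :
    isLMSChar o typemap = pvLms typemap o := by
  unfold isLMSChar pvLms
  by_cases h : o ≤ 0
  · simp [h, show ¬ (0 < o) by omega]
  · simp only [if_neg h, show (0 : Int) < o by omega, decide_true, Bool.true_and]
    by_cases h1 : PySem.List.pyGetD typemap o 0 = 83 <;>
      by_cases h2 : PySem.List.pyGetD typemap (o - 1) 0 = 76 <;>
        simp [h1, h2]

theorem bIsLMS_eq_pvLms (typemap : List Int) (o : Int) :
    bIsLMS typemap o = pvLms typemap o := by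
  unfold bIsLMS pvLms bFlag
  by_cases h0 : (0 : Int) < o <;> simp [h0]

theorem pvLms_flag (typemap : List Int) (o : Int) (h0 : 0 < o) :
    pvLms typemap o = bFlag typemap o := by
  unfold pvLms bFlag
  simp [h0]

theorem lmsLoop_eq (string typemap : List Int) (a b : Int) (i0 : Nat)
    (hret : pvReturns string typemap a b i0)
    (hcont : ∀ j < i0, pvCont string typemap a b j) :
    ∀ fuel i, i ≤ i0 → i0 < fuel + i →
      lmsLoop string typemap a b fuel i =
        (decide (0 < i0) && pvLms typemap ((i0 : Int) + a) && pvLms typemap ((i0 : Int) + b)) := by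
  intro fuel
  induction fuel with
  | zero => intro i h1 h2; omega
  | succ fuel ih =>
    intro i h1 h2
    rcases Nat.lt_or_ge i i0 with hlt | hge
    · -- a continuing step
      obtain ⟨_, _, heq, hnot, _, _, hch⟩ := hcont i hlt
      rw [lmsLoop]
      simp only [isLMSChar_eq_pvLms]
      rw [if_neg hnot, if_neg (by simp [heq]), if_neg (by simp [hch])]
      exact ih (i + 1) (by omega) (by omega)
    · -- the deciding step: i = i0
      have hii : i = i0 := by omega
      subst hii
      obtain ⟨_, _, hdis⟩ := hret
      rw [lmsLoop]
      simp only [isLMSChar_eq_pvLms]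
      by_cases hs1 : 0 < i ∧ pvLms typemap ((i : Int) + a) = true ∧ pvLms typemap ((i : Int) + b) = true
      · rw [if_pos hs1]
        obtain ⟨hi, ha, hb⟩ := hs1
        simp [ha, hb, hi]
      · rw [if_neg hs1]
        have hrhs : (decide (0 < i) && pvLms typemap ((i : Int) + a) && pvLms typemap ((i : Int) + b)) = false := by
          by_cases hi : 0 < i <;>
            by_cases ha : pvLms typemap ((i : Int) + a) = true <;>
              by_cases hb : pvLms typemap ((i : Int) + b) = true <;>
                simp_all
        rw [hrhs]
        rcases hdis with hs1' | hs2 | hs3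
        · exact absurd hs1' hs1
        · rw [if_pos hs2]
        · by_cases hs2' : pvLms typemap ((i : Int) + a) ≠ pvLms typemap ((i : Int) + b)
          · rw [if_pos hs2']
          · rw [if_neg hs2', if_pos hs3.2.2]

theorem bNextScan_some (typemap : List Int) (offset : Int) :
    ∀ fuel (j d : Int), bNextScan typemap offset j fuel = some d →
      bFlag typemap (offset + d) = true ∧ j ≤ offset + d ∧ offset + d < (typemap.length : Int) := by
  intro fuel
  induction fuel with
  | zero => intro j d h; simp [bNextScan] at h
  | succ fuel ih =>
    intro j d h
    rw [bNextScan] at h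
    by_cases hj : j < (typemap.length : Int)
    · rw [if_pos hj] at h
      by_cases hf : bFlag typemap j = true
      · rw [if_pos hf] at h
        have : j - offset = d := by injection h
        have hjd : offset + d = j := by omega
        rw [hjd]; exact ⟨hf, le_refl _, hj⟩
      · rw [if_neg hf] at h
        obtain ⟨h1, h2, h3⟩ := ih (j + 1) d h
        exact ⟨h1, by omega, h3⟩
    · rw [if_neg hj] at h; exact absurd h (by simp)
  
theorem bNextScan_finds (typemap : List Int) (offset : Int) :
    ∀ fuel (j t : Int), j ≤ t → t < (typemap.length : Int) → bFlag typemap t = true →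
      (∀ k : Int, j ≤ k → k < t → bFlag typemap k = false) →
      (t - j).toNat < fuel →
      bNextScan typemap offset j fuel = some (t - offset) := by
  intro fuel
  induction fuel with
  | zero => intro j t _ _ _ _ h; omega
  | succ fuel ih =>
    intro j t hjt htm hft hno hfu
    rw [bNextScan, if_pos (by omega)]
    rcases eq_or_lt_of_le hjt with heq | hlt
    · subst heq; rw [if_pos hft]
    · rw [if_neg (by simp [hno j le_rfl hlt])]
      exact ih (j + 1) t (by omega) htm hft (fun k hk1 hk2 => hno k (by omega) hk2) (by omega)

-- ===== VERDICT (by name: the statement is the Claim_ definition above) =====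
theorem lmsSubstringAreEqual_spec : Claim_equal_lmsSubstringAreEqual := by
  intro string typemap a b _hdom hpre
  unfold Spec_lmsSubstringAreEqual lmsSubstringAreEqual lmsSubstringAreEqual_alt
  by_cases hg : a = (string.length : Int) ∨ b = (string.length : Int)
  · rw [if_pos hg, if_pos hg]
  · rw [if_neg hg, if_neg hg]
    rcases hpre with h | h | ⟨i0, hi0fuel, hret, hcont⟩
    · exact absurd (Or.inl h) hg
    · exact absurd (Or.inr h) hg
    have hfuel : i0 < string.length + typemap.length + a.natAbs + b.natAbs + 2 := by
      rcases Nat.eq_zero_or_pos i0 with h | h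
      · omega
      · have hc := (hcont (i0 - 1) (by omega)).2.2.2.2.1
        unfold pvSafeC at hc
        have hcast : ((i0 - 1 : Nat) : Int) = (i0 : Int) - 1 := by omega
        rw [hcast] at hc
        omega
    rw [lmsLoop_eq string typemap a b i0 hret hcont _ 0 (Nat.zero_le _) (by omega)]
    -- inside the run, no position after the offsets is LMS
    have hF1 : ∀ j : Nat, 0 < j → j < i0 →
        pvLms typemap ((j : Int) + a) = false ∧ pvLms typemap ((j : Int) + b) = false := by
      intro j hj hjlt
      obtain ⟨_, _, heq, hnot, _⟩ := hcont j hjlt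
      cases hva : pvLms typemap ((j : Int) + a) with
      | false => exact ⟨rfl, by rw [← heq, hva]⟩
      | true => exact absurd ⟨hj, hva, by rw [← heq, hva]⟩ hnot
    have hnfa : ∀ k : Int, max a 0 + 1 ≤ k → k < (i0 : Int) + a → bFlag typemap k = false := by
      intro k hk1 hk2
      have hmax : a ≤ max a 0 := le_max_left a 0
      have hmax0 : (0 : Int) ≤ max a 0 := le_max_right a 0
      have hk0 : 0 < k := by omega
      have hj1 : 1 ≤ k - a := by omega
      have hcast : ((k - a).toNat : Int) = k - a := Int.toNat_of_nonneg (by omega)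
      have hjl : (k - a).toNat < i0 := by omega
      have := (hF1 (k - a).toNat (by omega) hjl).1
      rw [show ((k - a).toNat : Int) + a = k by omega] at this
      rw [← pvLms_flag typemap k hk0]
      exact this
    have hnfb : ∀ k : Int, max b 0 + 1 ≤ k → k < (i0 : Int) + b → bFlag typemap k = false := by
      intro k hk1 hk2
      have hmax : b ≤ max b 0 := le_max_left b 0
      have hmax0 : (0 : Int) ≤ max b 0 := le_max_right b 0
      have hk0 : 0 < k := by omega
      have hcast : ((k - b).toNat : Int) = k - b := Int.toNat_of_nonneg (by omega)
      have hjl : (k - b).toNat < i0 := by omega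
      have := (hF1 (k - b).toNat (by omega) hjl).2
      rw [show ((k - b).toNat : Int) + b = k by omega] at this
      rw [← pvLms_flag typemap k hk0]
      exact this
    -- a scan on either side lands exactly on i0 when that side is LMS at i0
    have hscan : ∀ c : Int, pvSafeL typemap ((i0 : Int) + c) →
        (∀ k : Int, max c 0 + 1 ≤ k → k < (i0 : Int) + c → bFlag typemap k = false) →
        0 < i0 → pvLms typemap ((i0 : Int) + c) = true →
        bNextLMSDistance typemap c = some (i0 : Int) := by
      intro c hsafe hnf hpos hlms
      have ht0 : 0 < (i0 : Int) + c := by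
        by_contra hcon
        rw [pvLms] at hlms
        simp [show ¬ ((0:Int) < (i0 : Int) + c) from hcon] at hlms
      have htm : (i0 : Int) + c < (typemap.length : Int) := by
        rcases hsafe with h | h
        · omega
        · exact h
      have hmax : c ≤ max c 0 := le_max_left c 0
      have hmax0 : (0 : Int) ≤ max c 0 := le_max_right c 0
      have hres := bNextScan_finds typemap c (typemap.length + 1) (max c 0 + 1) ((i0 : Int) + c)
        (by omega) htm (by rw [← pvLms_flag typemap _ ht0]; exact hlms) hnf (by omega)
      rw [bNextLMSDistance, hres, show (i0 : Int) + c - c = (i0 : Int) by omega]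
    -- case split on the deciding branch
    by_cases hs1 : 0 < i0 ∧ pvLms typemap ((i0 : Int) + a) = true ∧ pvLms typemap ((i0 : Int) + b) = true
    · -- A returns True
      obtain ⟨hpos, hla, hlb⟩ := hs1
      have hda := hscan a hret.1 hnfa hpos hla
      have hdb := hscan b hret.2.1 hnfb hpos hlb
      have hfl0 : bIsLMS typemap a = bIsLMS typemap b := by
        rw [bIsLMS_eq_pvLms typemap a, bIsLMS_eq_pvLms typemap b]
        simpa using (hcont 0 hpos).2.2.1
      simp only [hda, hdb]
      rw [if_neg (by simp [hfl0])]
      have hall : (List.range ((i0 : Int)).toNat).all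
          (fun i => PySem.List.pyGetD string ((i : Int) + a) 0 == PySem.List.pyGetD string ((i : Int) + b) 0) = true := by
        rw [List.all_eq_true]
        intro i hi
        rw [List.mem_range, Int.toNat_natCast] at hi
        have := (hcont i hi).2.2.2.2.2.2
        simpa using this
      rw [hall]
      simp [hpos, hla, hlb]
    · -- A returns False
      have hrhs : (decide (0 < i0) && pvLms typemap ((i0 : Int) + a) && pvLms typemap ((i0 : Int) + b)) = false := by
        by_cases hi : 0 < i0 <;>
          by_cases ha : pvLms typemap ((i0 : Int) + a) = true <;>
            by_cases hb : pvLms typemap ((i0 : Int) + b) = true <;>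
              simp_all
      rw [hrhs]
      by_cases hs2 : pvLms typemap ((i0 : Int) + a) = pvLms typemap ((i0 : Int) + b)
      · -- flags agree at i0, so a character differs there
        have hs3 : PySem.List.pyGetD string ((i0 : Int) + a) 0 ≠ PySem.List.pyGetD string ((i0 : Int) + b) 0 := by
          rcases hret.2.2 with h | h | h
          · exact absurd h hs1
          · exact absurd hs2 h
          · exact h.2.2
        have hfl0 : bIsLMS typemap a = bIsLMS typemap b := by
          rw [bIsLMS_eq_pvLms typemap a, bIsLMS_eq_pvLms typemap b]
          rcases Nat.eq_zero_or_pos i0 with h | h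
          · subst h; simpa using hs2
          · simpa using (hcont 0 h).2.2.1
        by_cases hdd : bNextLMSDistance typemap a = bNextLMSDistance typemap b
        · rcases hv : bNextLMSDistance typemap a with _ | d
          · rw [hv] at hdd
            simp [← hdd]
          · rw [hv] at hdd
            simp only [← hdd]
            rw [if_neg (by simp [hfl0])]
            obtain ⟨hflag, hge, hlt⟩ := bNextScan_some typemap a (typemap.length + 1) (max a 0 + 1) d hv
            have hmax : a ≤ max a 0 := le_max_left a 0
            have hmax0 : (0 : Int) ≤ max a 0 := le_max_right a 0
            have had : 0 < a + d := by omega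
            have hlmsd : pvLms typemap ((d.toNat : Int) + a) = true := by
              rw [show ((d.toNat : Int) + a) = a + d by omega, pvLms_flag typemap _ had]
              exact hflag
            have hdgt : i0 < d.toNat := by
              by_contra hcon
              have hd1 : 1 ≤ d := by omega
              rcases Nat.lt_or_ge d.toNat i0 with hlt' | hge'
              · have hfalse := (hF1 d.toNat (by omega) hlt').1
                rw [hfalse] at hlmsd
                exact absurd hlmsd (by decide)
              · have : d.toNat = i0 := by omega
                rw [this] at hlmsd
                have hpos : 0 < i0 := by omega
                exact hs1 ⟨hpos, hlmsd, by rw [← hs2]; exact hlmsd⟩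
            have hall : (List.range d.toNat).all
                (fun i => PySem.List.pyGetD string ((i : Int) + a) 0 == PySem.List.pyGetD string ((i : Int) + b) 0) = false := by
              rw [List.all_eq_false]
              exact ⟨i0, List.mem_range.mpr hdgt, by simpa using hs3⟩
            rw [hall]
        · rw [if_pos (Or.inr (Or.inl hdd))]
      · -- the flags differ at i0
        rcases Nat.eq_zero_or_pos i0 with h | hpos
        · subst h
          rw [if_pos]
          left
          rw [bIsLMS_eq_pvLms typemap a, bIsLMS_eq_pvLms typemap b]
          simpa using hs2
        · rw [if_pos]
          right; left
          cases hva : pvLms typemap ((i0 : Int) + a) with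
          | true =>
            have hvb : pvLms typemap ((i0 : Int) + b) = false := by
              cases hvb' : pvLms typemap ((i0 : Int) + b)
              · rfl
              · exact absurd (hva.trans hvb'.symm) hs2
            rw [hscan a hret.1 hnfa hpos hva]
            intro hcon
            obtain ⟨hflag, hge, _⟩ := bNextScan_some typemap b (typemap.length + 1) (max b 0 + 1) (i0 : Int) hcon.symm
            have hmax : b ≤ max b 0 := le_max_left b 0
            have hmax0 : (0 : Int) ≤ max b 0 := le_max_right b 0
            have hb0 : 0 < b + (i0 : Int) := by omega
            rw [← pvLms_flag typemap _ hb0, show b + (i0 : Int) = (i0 : Int) + b by omega, hvb] at hflag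
            exact Bool.false_ne_true hflag
          | false =>
            have hvb : pvLms typemap ((i0 : Int) + b) = true := by
              cases hvb' : pvLms typemap ((i0 : Int) + b)
              · exact absurd (hva.trans hvb'.symm) hs2
              · rfl
            rw [hscan b hret.2.1 hnfb hpos hvb]
            intro hcon
            obtain ⟨hflag, hge, _⟩ := bNextScan_some typemap a (typemap.length + 1) (max a 0 + 1) (i0 : Int) hcon
            have hmax : a ≤ max a 0 := le_max_left a 0
            have hmax0 : (0 : Int) ≤ max a 0 := le_max_right a 0
            have ha0 : 0 < a + (i0 : Int) := by omega
            rw [← pvLms_flag typemap _ ha0, show a + (i0 : Int) = (i0 : Int) + a by omega, hva] at hflag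
            exact Bool.false_ne_true hflag
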